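-- pv_equiv track=rewrite | github.com/temur-kh/TCS | Assignment2/fsa_translator.py | __get_initial_regexes
-- ===== SOURCE A (Python) =====
-- __EPS = "eps"
--
-- __EMPTY_SET = "{}"
--
-- def __create_in_trans_map(states, trans):
--     """
--     Create a graph of transitions in the form of a dictionary
--     :param trans: a list of transitions of the form tuple(s1>a>s2) where s1 and s2 are states, and a is an alpha
--     :return: a dictionary of transitions in form {state: {state: [alphas]}}
--     """
--     trans_map = {in_st: {out_st: [] for out_st in states} for in_st in states}
--     for tup in trans:
--         trans_map[tup[0]][tup[2]].append(tup[1])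
--     for in_st, out_st in zip(states, states):
--         trans_map[in_st][out_st].sort()
--     return trans_map
--
-- def __get_initial_regexes(states, trans):
--     """
--     Get the initial regular expressions
--     :param states: a list of states defined in the FSA
--     :param trans: a list of transitions of the form tuple(s1>a>s2) where s1 and s2 are states, and a is an alpha
--     :return: a list with regexes corresponding to the in_state and out_state
--     """
--     in_trans = __create_in_trans_map(states, trans)
--     regexes = {out_st: {in_st: None for in_st in states} for out_st in states}
--     # suppose checked with __is_nondeterministic() beforehand
--     for out_st in states:
--         for in_st in states:
--
--             if out_st == in_st:
--                 regexes[out_st][in_st] = '|'.join(in_trans[out_st][in_st] + [__EPS])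
--             elif len(in_trans[out_st][in_st]) == 0:
--                 regexes[out_st][in_st] = __EMPTY_SET
--             else:
--                 regexes[out_st][in_st] = '|'.join(in_trans[out_st][in_st])
--     return regexes
-- ===== SOURCE B (Python) =====
-- def __get_initial_regexes(states, trans):
--     # no intermediate transition map: each cell is computed directly by scanning trans
--     def cell(a, b):
--         alphas = [x for s1, x, s2, *_ in trans if s1 == a and s2 == b]
--         if a == b:
--             return '|'.join(sorted(alphas) + ["eps"])
--         return '|'.join(alphas) if alphas else "{}"
--     return {a: {b: cell(a, b) for b in states} for a in states}
-- ===== Notes on version B (the rewrite author's own statement) =====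
-- stated objective: simpler
-- what changed: B drops both of A's intermediate dictionaries (the dense trans_map of alpha-lists and the None-initialised regex grid): each cell (a,b) is computed directly inside one nested dict comprehension by filtering trans for transitions a->b, sorting only on the diagonal, so the result is built in a single expression with no staged fill-and-overwrite passes.
import Mathlib
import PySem

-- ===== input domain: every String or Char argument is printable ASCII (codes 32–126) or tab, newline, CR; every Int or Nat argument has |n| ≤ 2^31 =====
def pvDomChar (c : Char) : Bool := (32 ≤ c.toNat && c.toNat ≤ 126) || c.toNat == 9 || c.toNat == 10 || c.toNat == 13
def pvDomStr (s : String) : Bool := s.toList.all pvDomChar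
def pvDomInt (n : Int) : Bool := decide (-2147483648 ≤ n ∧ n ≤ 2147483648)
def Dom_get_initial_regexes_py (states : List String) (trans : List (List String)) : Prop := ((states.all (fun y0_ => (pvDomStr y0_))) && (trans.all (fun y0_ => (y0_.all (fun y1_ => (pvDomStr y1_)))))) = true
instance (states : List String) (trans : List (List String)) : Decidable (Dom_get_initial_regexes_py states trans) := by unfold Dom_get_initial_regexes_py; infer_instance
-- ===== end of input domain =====

-- B removes A's two staged intermediate dictionaries and computes every cell directly with a
-- per-cell scan of trans inside one nested comprehension (objective: simpler; not faster).

-- ===== PORT A =====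
-- tup[i] for i = 0,1,2; Pre_ guarantees 3 ≤ len(tup), so the "" default of .getD never fires
-- (Python raises IndexError there, which Pre_ excludes).
def pvK (t : List String) (i : Int) : String := (PySem.List.pyGet? t i).getD ""

-- __create_in_trans_map: dense {state: {state: [alphas]}} map; the trans loop's
-- trans_map[tup[0]][tup[2]].append is Dict.modify (a KeyError there is excluded by Pre_).
def pyA_trans_map (states : List String) (trans : List (List String)) :
    PySem.Dict String (PySem.Dict String (List String)) :=
  let tm0 := states.foldl (fun d in_st =>
      d.insert in_st (states.foldl (fun d2 out_st => d2.insert out_st ([] : List String)) PySem.Dict.empty))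
    PySem.Dict.empty
  let tm1 := trans.foldl (fun d tup =>
      d.modify (pvK tup 0) PySem.Dict.empty
        (fun inner => inner.modify (pvK tup 2) [] (fun l => l ++ [pvK tup 1]))) tm0
  (states.zip states).foldl (fun d p =>
      d.modify p.1 PySem.Dict.empty
        (fun inner => inner.modify p.2 [] (fun l => PySem.List.sorted l (fun x => x) false))) tm1

def get_initial_regexes_py (states : List String) (trans : List (List String)) :
    List (String × List (String × String)) :=
  let in_trans := pyA_trans_map states trans
  let init : PySem.Dict String (PySem.Dict String (Option String)) :=
    states.foldl (fun d out_st =>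
      d.insert out_st (states.foldl (fun d2 in_st => d2.insert in_st (none : Option String)) PySem.Dict.empty))
      PySem.Dict.empty
  let final := states.foldl (fun d out_st =>
      states.foldl (fun d in_st =>
        let cell := (in_trans.getD out_st PySem.Dict.empty).getD in_st []
        let v := if out_st = in_st then PySem.Str.join "|" (cell ++ ["eps"])
          else if cell.length = 0 then "{}"
          else PySem.Str.join "|" cell
        d.modify out_st PySem.Dict.empty (fun inner => inner.insert in_st (some v))) d) init
  -- every cell of the None-initialised grid is overwritten by the loop above; .getD "" realises the Option
  final.items.map (fun p => (p.1, p.2.items.map (fun q => (q.1, q.2.getD ""))))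

-- ===== PORT B =====
-- cell(a, b) of Source B: filter trans for a->b transitions, sort only on the diagonal
def pvCellB (trans : List (List String)) (a b : String) : String :=
  let alphas := (trans.filter (fun t => pvK t 0 == a && pvK t 2 == b)).map (fun t => pvK t 1)
  if a = b then PySem.Str.join "|" (PySem.List.sorted alphas (fun x => x) false ++ ["eps"])
  else if alphas = [] then "{}"
  else PySem.Str.join "|" alphas

def get_initial_regexes_py_alt (states : List String) (trans : List (List String)) :
    List (String × List (String × String)) :=
  let final : PySem.Dict String (PySem.Dict String String) :=
    states.foldl (fun d a =>
      d.insert a (states.foldl (fun d2 b => d2.insert b (pvCellB trans a b)) PySem.Dict.empty))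
      PySem.Dict.empty
  final.items.map (fun p => (p.1, p.2.items))

-- ===== PRECONDITION & SPEC =====
-- Exactly the inputs where Python A returns: every transition tuple has length ≥ 3 (else IndexError)
-- and its source (tup[0]) and target (tup[2]) are declared states (else KeyError).
def Pre_get_initial_regexes_py (states : List String) (trans : List (List String)) : Prop :=
  ∀ t ∈ trans, 3 ≤ t.length ∧ t.getD 0 "" ∈ states ∧ t.getD 2 "" ∈ states
instance (states : List String) (trans : List (List String)) : Decidable (Pre_get_initial_regexes_py states trans) := by unfold Pre_get_initial_regexes_py; infer_instance

def pvWitness_get_initial_regexes_py : List String × List (List String) :=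
  (["a", "b"], [["a", "x", "b"], ["a", "y", "a"]])

def Spec_get_initial_regexes_py (states : List String) (trans : List (List String)) (out : List (String × List (String × String))) : Prop := out = get_initial_regexes_py_alt states trans
instance (states : List String) (trans : List (List String)) (out : List (String × List (String × String))) : Decidable (Spec_get_initial_regexes_py states trans out) := by unfold Spec_get_initial_regexes_py; infer_instance

-- ===== CLAIM (what is proved, stated in full; the proofs are below) =====
def Claim_equal_get_initial_regexes_py : Prop := ∀ (states : List String) (trans : List (List String)), Dom_get_initial_regexes_py states trans → Pre_get_initial_regexes_py states trans → Spec_get_initial_regexes_py states trans (get_initial_regexes_py states trans)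
-- ===== LEMMAS AND PROOFS =====

-- the distinct states in first-occurrence order: the key list of every dict in play
def pvSS (states : List String) : List String := PySem.Set.ofList states

-- the alphas of the transitions a → b, in trans order
def pvAlphas (trans : List (List String)) (a b : String) : List String :=
  (trans.filter (fun t => pvK t 0 == a && pvK t 2 == b)).map (fun t => pvK t 1)

-- the regex A computes for cell (a, b) (a, b ∈ states)
def pvVA (trans : List (List String)) (a b : String) : String :=
  if a = b then PySem.Str.join "|" (PySem.List.sorted (pvAlphas trans a a) (fun x => x) false ++ ["eps"])
  else if (pvAlphas trans a b).length = 0 then "{}"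
  else PySem.Str.join "|" (pvAlphas trans a b)

-- the items list of a dict-of-dicts whose cell (a, b) holds G a b, keys pvSS at both levels
def pvShape {ν : Type} (S : List String) (G : String → String → ν) : List (String × PySem.Dict String ν) :=
  S.map (fun a => (a, PySem.Dict.mk (S.map (fun b => (b, G a b)))))

theorem pv_zip_self {α : Type} (l : List α) : l.zip l = l.map fun s => (s, s) := by
  induction l with
  | nil => rfl
  | cons x xs ih => simp [List.zip]

theorem pv_keys_shape {ν : Type} {S : List String} {F : String → ν} {d : PySem.Dict String ν}
    (h : d.items = S.map fun a => (a, F a)) : d.keys = S := by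
  simp only [PySem.Dict.keys, h, List.map_map]
  exact List.map_congr_left (fun a _ => rfl) |>.trans (List.map_id _)

theorem pv_write {ν : Type} {S : List String} {F : String → ν} {d : PySem.Dict String ν}
    (h : d.items = S.map fun a => (a, F a)) {a0 : String} (ha : a0 ∈ S) (v : ν) :
    (d.insert a0 v).items = S.map fun a => (a, if a = a0 then v else F a) := by
  have hc : d.contains a0 = true := by
    rw [PySem.Dict.contains_eq_decide_mem_keys, pv_keys_shape h]; simp [ha]
  rw [PySem.Dict.items_insert_of_contains d v hc, h, List.map_map]
  apply List.map_congr_left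
  intro a hmem
  by_cases hax : a = a0 <;> simp [hax, Function.comp]

theorem pv_getD_shape {ν : Type} {S : List String} {F : String → ν} {d : PySem.Dict String ν}
    (hS : S.Nodup) (h : d.items = S.map fun a => (a, F a)) {a : String} (ha : a ∈ S) (d0 : ν) :
    d.getD a d0 = F a := by
  apply PySem.Dict.getD_of_mem_items d (v := F a) ?_ ?_ d0
  · rw [h]; exact List.mem_map_of_mem ha
  · rw [pv_keys_shape h]; exact hS

theorem pv_shape_foldl_insert {ν : Type} (c : String → ν) :
    ∀ (l S : List String) (F : String → ν) (d : PySem.Dict String ν),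
    d.items = S.map (fun a => (a, F a)) →
    (l.foldl (fun d a => d.insert a (c a)) d).items
      = (PySem.Set.update S l).map (fun a => (a, if a ∈ l then c a else F a)) := by
  intro l
  induction l with
  | nil => intro S F d h; simpa [PySem.Set.update] using h
  | cons x xs ih =>
    intro S F d h
    rw [List.foldl_cons, PySem.Set.update_cons]
    by_cases hx : x ∈ S
    · have hd' : (d.insert x (c x)).items = S.map fun a => (a, if a = x then c x else F a) :=
        pv_write h hx (c x)
      have hadd : PySem.Set.add S x = S := by
        simp [PySem.Set.add, PySem.Set.contains, hx]
      rw [hadd, ih S _ _ hd']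
      apply List.map_congr_left
      intro a hmem
      by_cases h1 : a ∈ xs
      · simp [h1]
      · by_cases h2 : a = x <;> simp [h1, h2]
    · have hc : d.contains x = false := by
        rw [PySem.Dict.contains_eq_decide_mem_keys, pv_keys_shape h]; simp [hx]
      have hd' : (d.insert x (c x)).items
          = (S ++ [x]).map fun a => (a, if a = x then c x else F a) := by
        rw [PySem.Dict.items_insert_of_not_contains d (c x) hc, h]
        simp only [List.map_append, List.map_cons, List.map_nil]
        congr 1
        · apply List.map_congr_left
          intro a hmem
          have : a ≠ x := fun he => hx (he ▸ hmem)
          simp [this]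
      have hadd : PySem.Set.add S x = S ++ [x] := by
        simp [PySem.Set.add, PySem.Set.contains, hx]
      rw [hadd, ih (S ++ [x]) _ _ hd']
      apply List.map_congr_left
      intro a hmem
      by_cases h1 : a ∈ xs
      · simp [h1]
      · by_cases h2 : a = x <;> simp [h1, h2]

theorem pv_shape_congr {ν : Type} (S : List String) {G1 G2 : String → String → ν}
    (h : ∀ a ∈ S, ∀ b ∈ S, G1 a b = G2 a b) : pvShape S G1 = pvShape S G2 := by
  unfold pvShape
  apply List.map_congr_left
  intro a hmem
  congr 1
  congr 1
  exact List.map_congr_left fun b hb => by rw [h a hmem b hb]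

theorem pv_mwrite {ν : Type} {S : List String} (hS : S.Nodup) {G : String → String → ν}
    {d : PySem.Dict String (PySem.Dict String ν)} (h : d.items = pvShape S G)
    {a0 b0 : String} (ha : a0 ∈ S) (hb : b0 ∈ S) (v : ν) (dflt : PySem.Dict String ν) :
    (d.modify a0 dflt (fun inner => inner.insert b0 v)).items
      = pvShape S (fun a b => if a = a0 ∧ b = b0 then v else G a b) := by
  have hget : d.getD a0 dflt = PySem.Dict.mk (S.map (fun b => (b, G a0 b))) :=
    pv_getD_shape hS h ha dflt
  have hinner : ((d.getD a0 dflt).insert b0 v).items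
      = S.map fun b => (b, if b = b0 then v else G a0 b) := by
    rw [hget]
    exact pv_write rfl hb v
  have hinner' : (d.getD a0 dflt).insert b0 v
      = PySem.Dict.mk (S.map fun b => (b, if b = b0 then v else G a0 b)) :=
    PySem.Dict.ext hinner
  show (d.insert a0 ((d.getD a0 dflt).insert b0 v)).items = _
  rw [hinner', pv_write h ha]
  apply List.map_congr_left
  intro a hmem
  by_cases hax : a = a0
  · subst hax; simp
  · simp [hax]

theorem pv_fillrow {ν : Type} {S : List String} (hS : S.Nodup) (W : String → String → ν)
    {a0 : String} (ha : a0 ∈ S) :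
    ∀ (l : List String), (∀ b ∈ l, b ∈ S) → ∀ {G : String → String → ν}
      (d : PySem.Dict String (PySem.Dict String ν)), d.items = pvShape S G →
    (l.foldl (fun d b => d.modify a0 PySem.Dict.empty (fun inner => inner.insert b (W a0 b))) d).items
      = pvShape S (fun a b => if a = a0 ∧ b ∈ l then W a b else G a b) := by
  intro l
  induction l with
  | nil => intro _ G d h; simpa using h
  | cons x xs ih =>
    intro hl G d h
    rw [List.foldl_cons]
    have hd' := pv_mwrite hS h ha (hl x (List.mem_cons_self ..)) (W a0 x) PySem.Dict.empty
    rw [ih (fun b hb => hl b (List.mem_cons_of_mem _ hb)) _ hd']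
    apply pv_shape_congr
    intro a hma b hmb
    by_cases h1 : a = a0 ∧ b ∈ xs
    · simp [h1]
    · by_cases h2 : a = a0 ∧ b = x
      · obtain ⟨h2a, h2b⟩ := h2; subst h2a; subst h2b; simp
      · have hn : ¬ (a = a0 ∧ b ∈ x :: xs) := by
          rintro ⟨rfl, hmm⟩
          rcases List.mem_cons.mp hmm with hm | hm
          · exact h2 ⟨rfl, hm⟩
          · exact h1 ⟨rfl, hm⟩
        simp only [if_neg hn, if_neg h2, if_neg h1]

theorem pv_fillgrid {ν : Type} {S : List String} (hS : S.Nodup) (W : String → String → ν)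
    (m : List String) (hm : ∀ b ∈ m, b ∈ S) :
    ∀ (l : List String), (∀ a ∈ l, a ∈ S) → ∀ {G : String → String → ν}
      (d : PySem.Dict String (PySem.Dict String ν)), d.items = pvShape S G →
    (l.foldl (fun d a0 =>
        m.foldl (fun d b => d.modify a0 PySem.Dict.empty (fun inner => inner.insert b (W a0 b))) d) d).items
      = pvShape S (fun a b => if a ∈ l ∧ b ∈ m then W a b else G a b) := by
  intro l
  induction l with
  | nil => intro _ G d h; simpa using h
  | cons x xs ih =>
    intro hl G d h
    rw [List.foldl_cons]
    have hd' := pv_fillrow hS W (hl x (List.mem_cons_self ..)) m hm d h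
    rw [ih (fun a hx => hl a (List.mem_cons_of_mem _ hx)) _ hd']
    apply pv_shape_congr
    intro a hma b hmb
    by_cases h1 : a ∈ xs ∧ b ∈ m
    · simp [h1]
    · by_cases h2 : a = x ∧ b ∈ m
      · obtain ⟨h2a, h2b⟩ := h2; subst h2a; simp [h2b]
      · have hn : ¬ (a ∈ x :: xs ∧ b ∈ m) := by
          rintro ⟨hmm, hm2⟩
          rcases List.mem_cons.mp hmm with hm1 | hm1
          · subst hm1; exact h2 ⟨rfl, hm2⟩
          · exact h1 ⟨hm1, hm2⟩
        simp only [if_neg hn, if_neg h2, if_neg h1]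

theorem pv_sorted_idem (l : List String) :
    PySem.List.sorted (PySem.List.sorted l (fun x => x) false) (fun x => x) false
      = PySem.List.sorted l (fun x => x) false := by
  apply PySem.List.eq_of_perm_of_pairwise_le_of_injective (fun x => x) (fun a b h => h)
  · exact PySem.List.sorted_perm _ _ _
  · exact PySem.List.sorted_pairwise _ _
  · exact PySem.List.sorted_pairwise _ _

-- the grid both ports build by the nested insert fold
theorem pv_init_shape {ν : Type} (states : List String) (c : String → String → ν) :
    (states.foldl (fun d a =>
        d.insert a (states.foldl (fun d2 b => d2.insert b (c a b)) PySem.Dict.empty))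
      PySem.Dict.empty).items = pvShape (pvSS states) c := by
  have hinner : ∀ a, (states.foldl (fun d2 b => d2.insert b (c a b)) PySem.Dict.empty)
      = PySem.Dict.mk ((pvSS states).map (fun b => (b, c a b))) := by
    intro a
    apply PySem.Dict.ext
    have h0 : (PySem.Dict.empty : PySem.Dict String ν).items
        = ([] : List String).map (fun b => (b, c a b)) := rfl
    rw [pv_shape_foldl_insert (c a) states [] _ _ h0]
    show ((PySem.Set.update PySem.Set.empty states).map _) = _
    rw [PySem.Set.update_empty]
    exact List.map_congr_left fun b hb => by
      simp [(PySem.Set.mem_ofList states b).mp hb]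
  have h0 : (PySem.Dict.empty : PySem.Dict String (PySem.Dict String ν)).items
      = ([] : List String).map (fun a => (a, PySem.Dict.mk ((pvSS states).map (fun b => (b, c a b))))) := rfl
  have := pv_shape_foldl_insert
      (fun a => states.foldl (fun d2 b => d2.insert b (c a b)) PySem.Dict.empty) states [] _ _ h0
  rw [this]
  show ((PySem.Set.update PySem.Set.empty states).map _) = _
  rw [PySem.Set.update_empty]
  unfold pvShape pvSS
  exact List.map_congr_left fun a hha => by
    simp only [(PySem.Set.mem_ofList states a).mp hha, if_pos]
    rw [hinner a]
    rfl

theorem pvAlphas_cons (t : List String) (ts : List (List String)) (a b : String) :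
    pvAlphas (t :: ts) a b
      = (if pvK t 0 = a ∧ pvK t 2 = b then [pvK t 1] else []) ++ pvAlphas ts a b := by
  by_cases h : pvK t 0 = a ∧ pvK t 2 = b
  · simp [pvAlphas, h]
  · simp [pvAlphas, h]

-- trans loop of __create_in_trans_map, read back through getD
theorem pv_tmtrans (trans : List (List String)) :
    ∀ (d : PySem.Dict String (PySem.Dict String (List String))) (a b : String),
    (((trans.foldl (fun d tup =>
        d.modify (pvK tup 0) PySem.Dict.empty
          (fun inner => inner.modify (pvK tup 2) [] (fun l => l ++ [pvK tup 1]))) d)).getD a PySem.Dict.empty).getD b []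
      = (d.getD a PySem.Dict.empty).getD b [] ++ pvAlphas trans a b := by
  induction trans with
  | nil => intro d a b; simp [pvAlphas]
  | cons t ts ih =>
    intro d a b
    rw [List.foldl_cons, ih, pvAlphas_cons]
    rw [PySem.Dict.getD_modify]
    by_cases h1 : a = pvK t 0
    · subst h1
      rw [if_pos rfl, PySem.Dict.getD_modify]
      by_cases h2 : b = pvK t 2
      · subst h2
        rw [if_pos rfl, if_pos ⟨rfl, rfl⟩]
        simp
      · rw [if_neg h2, if_neg (by rintro ⟨_, h⟩; exact h2 h.symm)]
        simp
    · rw [if_neg h1, if_neg (by rintro ⟨h, _⟩; exact h1 h.symm)]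
      simp

-- diagonal sort loop of __create_in_trans_map
theorem pv_sortfold (l : List String) :
    ∀ (d : PySem.Dict String (PySem.Dict String (List String))) (a b : String),
    (((l.foldl (fun d s =>
        d.modify s PySem.Dict.empty
          (fun inner => inner.modify s [] (fun x => PySem.List.sorted x (fun y => y) false))) d)).getD a PySem.Dict.empty).getD b []
      = if a = b ∧ a ∈ l
          then PySem.List.sorted ((d.getD a PySem.Dict.empty).getD a []) (fun y => y) false
          else (d.getD a PySem.Dict.empty).getD b [] := by
  induction l with
  | nil => intro d a b; simp
  | cons s rest ih =>
    intro d a b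
    rw [List.foldl_cons, ih]
    have hstep : ∀ (x y : String),
        (((d.modify s PySem.Dict.empty
          (fun inner => inner.modify s [] (fun z => PySem.List.sorted z (fun y => y) false))).getD x PySem.Dict.empty).getD y [])
        = if x = s ∧ y = s then PySem.List.sorted ((d.getD x PySem.Dict.empty).getD y []) (fun y => y) false
          else (d.getD x PySem.Dict.empty).getD y [] := by
      intro x y
      rw [PySem.Dict.getD_modify]
      by_cases h1 : x = s
      · subst h1
        rw [if_pos rfl, PySem.Dict.getD_modify]
        by_cases h2 : y = x
        · subst h2; simp
        · rw [if_neg h2, if_neg (by rintro ⟨_, hy⟩; exact h2 (hy.trans rfl))]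
      · rw [if_neg h1, if_neg (by rintro ⟨hx, _⟩; exact h1 hx)]
    by_cases hd : a = b ∧ a ∈ rest
    · obtain ⟨rfl, hmem⟩ := hd
      rw [if_pos ⟨rfl, hmem⟩, if_pos ⟨rfl, List.mem_cons_of_mem _ hmem⟩, hstep]
      by_cases hs : a = s
      · subst hs; rw [if_pos ⟨rfl, rfl⟩, pv_sorted_idem]
      · rw [if_neg (by rintro ⟨hx, _⟩; exact hs hx)]
    · rw [if_neg hd, hstep]
      by_cases hsx : a = s ∧ b = s
      · obtain ⟨rfl, rfl⟩ := hsx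
        rw [if_pos ⟨rfl, rfl⟩, if_pos ⟨rfl, List.mem_cons_self ..⟩]
      · rw [if_neg hsx]
        have : ¬ (a = b ∧ a ∈ s :: rest) := by
          rintro ⟨rfl, hmm⟩
          rcases List.mem_cons.mp hmm with h1 | h1
          · exact hsx ⟨h1, h1⟩
          · exact hd ⟨rfl, h1⟩
        rw [if_neg this]

theorem pv_tm0_cell (states : List String) (a b : String) :
    (((states.foldl (fun d in_st =>
        d.insert in_st (states.foldl (fun d2 out_st => d2.insert out_st ([] : List String)) PySem.Dict.empty))
      PySem.Dict.empty)).getD a PySem.Dict.empty).getD b [] = [] := by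
  have h : (states.foldl (fun d in_st =>
        d.insert in_st (states.foldl (fun d2 out_st => d2.insert out_st ([] : List String)) PySem.Dict.empty))
      PySem.Dict.empty).items
      = (pvSS states).map (fun a => (a, PySem.Dict.mk ((pvSS states).map (fun b => (b, ([] : List String)))))) :=
    pv_init_shape states (fun _ _ => [])
  by_cases ha : a ∈ pvSS states
  · rw [pv_getD_shape (PySem.Set.nodup_ofList states) h ha]
    by_cases hb : b ∈ pvSS states
    · exact pv_getD_shape (PySem.Set.nodup_ofList states) rfl hb []
    · apply PySem.Dict.getD_of_not_contains
      rw [PySem.Dict.contains_eq_decide_mem_keys,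
        pv_keys_shape (d := PySem.Dict.mk ((pvSS states).map (fun b => (b, ([] : List String))))) rfl]
      simp [hb]
  · have hc : (states.foldl (fun d in_st =>
        d.insert in_st (states.foldl (fun d2 out_st => d2.insert out_st ([] : List String)) PySem.Dict.empty))
        PySem.Dict.empty).contains a = false := by
      rw [PySem.Dict.contains_eq_decide_mem_keys, pv_keys_shape h]
      simp [ha]
    rw [PySem.Dict.getD_of_not_contains _ PySem.Dict.empty hc]
    simp

-- the dense trans_map of A, read through getD: sorted alphas on the diagonal, raw alphas elsewhere
theorem pv_trans_map_cell (states : List String) (trans : List (List String)) (a b : String) :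
    ((pyA_trans_map states trans).getD a PySem.Dict.empty).getD b []
      = if a = b ∧ a ∈ states then PySem.List.sorted (pvAlphas trans a a) (fun x => x) false
        else pvAlphas trans a b := by
  simp only [pyA_trans_map]
  rw [pv_zip_self, List.foldl_map]
  rw [pv_sortfold, pv_tmtrans, pv_tmtrans, pv_tm0_cell, pv_tm0_cell]
  simp

-- A's result in closed form (no precondition needed)
theorem pv_A_eq (states : List String) (trans : List (List String)) :
    get_initial_regexes_py states trans
      = (pvSS states).map (fun a => (a, (pvSS states).map (fun b => (b, pvVA trans a b)))) := by
  simp only [get_initial_regexes_py]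
  have hsub : ∀ x ∈ states, x ∈ pvSS states := fun x hx => (PySem.Set.mem_ofList states x).mpr hx
  have hstep : (List.foldl
        (fun d out_st => List.foldl (fun d in_st =>
            d.modify out_st PySem.Dict.empty fun inner =>
              inner.insert in_st
                (some
                  (if out_st = in_st then
                    PySem.Str.join "|"
                      (((pyA_trans_map states trans).getD out_st PySem.Dict.empty).getD in_st [] ++ ["eps"])
                  else
                    if (((pyA_trans_map states trans).getD out_st PySem.Dict.empty).getD in_st []).length = 0 then
                      "{}"
                    else
                      PySem.Str.join "|"
                        (((pyA_trans_map states trans).getD out_st PySem.Dict.empty).getD in_st []))))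
          d states)
        (List.foldl
          (fun d out_st => d.insert out_st (List.foldl (fun d2 in_st => d2.insert in_st none) PySem.Dict.empty states))
          PySem.Dict.empty states)
        states)
      = List.foldl
          (fun d out_st => List.foldl (fun d in_st =>
              d.modify out_st PySem.Dict.empty fun inner =>
                inner.insert in_st (some (pvVA trans out_st in_st))) d states)
          (List.foldl
            (fun d out_st => d.insert out_st (List.foldl (fun d2 in_st => d2.insert in_st none) PySem.Dict.empty states))
            PySem.Dict.empty states)
          states := by
    apply PySem.List.foldl_congr_mem'
    intro out_st hout acc
    apply PySem.List.foldl_congr_mem'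
    intro in_st hin acc2
    rw [pv_trans_map_cell states trans out_st in_st]
    by_cases hab : out_st = in_st
    · subst hab; simp [pvVA, hout]
    · simp [pvVA, hab]
  rw [hstep]
  have hinit : (List.foldl
      (fun d out_st => d.insert out_st (List.foldl (fun d2 in_st => d2.insert in_st none) PySem.Dict.empty states))
      PySem.Dict.empty states).items = pvShape (pvSS states) (fun _ _ => (none : Option String)) :=
    pv_init_shape states (fun _ _ => none)
  have hfill : (List.foldl
      (fun d out_st => List.foldl (fun d in_st =>
          d.modify out_st PySem.Dict.empty fun inner =>
            inner.insert in_st (some (pvVA trans out_st in_st))) d states)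
      (List.foldl
        (fun d out_st => d.insert out_st (List.foldl (fun d2 in_st => d2.insert in_st none) PySem.Dict.empty states))
        PySem.Dict.empty states)
      states).items
      = pvShape (pvSS states)
          (fun a b => if a ∈ states ∧ b ∈ states then some (pvVA trans a b) else none) :=
    pv_fillgrid (PySem.Set.nodup_ofList states) (fun a b => some (pvVA trans a b))
      states hsub states hsub _ hinit
  rw [hfill]
  unfold pvShape
  rw [List.map_map]
  apply List.map_congr_left
  intro a hma
  have ha' : a ∈ states := (PySem.Set.mem_ofList states a).mp hma
  simp only [Function.comp]
  refine congrArg _ ?_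
  show (PySem.Dict.mk _).items.map _ = _
  rw [List.map_map]
  apply List.map_congr_left
  intro b hmb
  have hb' : b ∈ states := (PySem.Set.mem_ofList states b).mp hmb
  simp [ha', hb']

-- B's per-cell value coincides with A's closed-form cell value
theorem pvCellB_eq (trans : List (List String)) (a b : String) :
    pvCellB trans a b = pvVA trans a b := by
  unfold pvCellB pvVA pvAlphas
  by_cases hab : a = b
  · subst hab; simp
  · rw [if_neg hab, if_neg hab]
    by_cases h : ((trans.filter (fun t => pvK t 0 == a && pvK t 2 == b)).map (fun t => pvK t 1)) = []
    · rw [if_pos h, if_pos (by simp [h])]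
    · rw [if_neg h, if_neg (by simpa [List.length_eq_zero_iff] using h)]

-- B's result in closed form (no precondition needed)
theorem pv_B_eq (states : List String) (trans : List (List String)) :
    get_initial_regexes_py_alt states trans
      = (pvSS states).map (fun a => (a, (pvSS states).map (fun b => (b, pvVA trans a b)))) := by
  simp only [get_initial_regexes_py_alt]
  rw [pv_init_shape states (pvCellB trans)]
  unfold pvShape
  rw [List.map_map]
  apply List.map_congr_left
  intro a _
  simp only [Function.comp]
  refine congrArg _ ?_
  show (PySem.Dict.mk _).items = _
  show List.map _ (pvSS states) = _
  exact List.map_congr_left fun b _ => by rw [pvCellB_eq]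

-- ===== VERDICT (by name: the statement is the Claim_ definition above) =====
theorem get_initial_regexes_py_spec : Claim_equal_get_initial_regexes_py := by
  intro states trans _ _
  unfold Spec_get_initial_regexes_py
  rw [pv_A_eq, pv_B_eq]
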